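-- pv_equiv track=rewrite | github.com/JeongEunJi1127/Algorithm | 알고리즘 분류/구현/16935.py | solution5
-- ===== SOURCE A (Python) =====
-- def solution5(array):
--     n = len(array)
--     m = len(array[0])
--     newArr = []
--     arr1 = []
--     arr2 = []
--     arr3 = []
--     arr4 = []
--
--     for i in range(n//2):
--         lst = []
--         for j in range(m//2):
--             lst.append(array[i][j])
--         arr1.append(lst)
--
--     for i in range(n//2):
--         lst = []
--         for j in range(m//2,m):
--             lst.append(array[i][j])
--         arr2.append(lst)
--
--     for i in range(n//2,n):
--         lst = []
--         for j in range(m//2,m):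
--             lst.append(array[i][j])
--         arr3.append(lst)
--
--     for i in range(n//2,n):
--         lst = []
--         for j in range(m//2):
--             lst.append(array[i][j])
--         arr4.append(lst)
--
--     for i in range(n//2):
--         newArr.append(arr4[i]+arr1[i])
--     for i in range(n//2):
--         newArr.append(arr3[i]+arr2[i])
--     return newArr
-- ===== SOURCE B (Python) =====
-- def solution5(array):
--     n, m = len(array), len(array[0])
--     h, w = n // 2, m // 2
--     out = [array[h + i][:w] + array[i][:w] for i in range(h)]
--     out += [array[h + i][w:m] + array[i][w:m] for i in range(h)]
--     return out
-- ===== Notes on version B (the rewrite author's own statement) =====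
-- stated objective: simpler
-- what changed: Replaces the four quadrant-building double loops plus two reassembly loops with two comprehensions that build each output row directly from list slices of the input rows, with no intermediate quadrant lists.
import Mathlib
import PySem

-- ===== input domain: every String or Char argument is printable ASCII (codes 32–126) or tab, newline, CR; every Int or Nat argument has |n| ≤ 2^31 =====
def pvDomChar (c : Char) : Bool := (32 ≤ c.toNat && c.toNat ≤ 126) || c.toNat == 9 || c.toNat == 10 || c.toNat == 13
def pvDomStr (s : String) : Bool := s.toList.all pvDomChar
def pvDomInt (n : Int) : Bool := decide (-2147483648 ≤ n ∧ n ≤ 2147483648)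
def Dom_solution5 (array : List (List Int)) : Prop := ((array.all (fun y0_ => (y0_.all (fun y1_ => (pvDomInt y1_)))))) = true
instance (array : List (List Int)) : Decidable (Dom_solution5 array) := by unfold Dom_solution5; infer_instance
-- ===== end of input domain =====

-- B drops A's four intermediate quadrant lists and builds each output row directly from
-- slices of the input rows (simpler decomposition; same asymptotic cost).

-- ===== PORT A =====
def solution5 (array : List (List Int)) : List (List Int) :=
  let n : Int := PySem.List.len array
  let m : Int := PySem.List.len (PySem.List.pyGetD array 0 [])
  let arr1 := (PySem.List.pyRange 0 (PySem.Int.floordiv n 2) 1).foldl (fun acc i =>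
    acc ++ [(PySem.List.pyRange 0 (PySem.Int.floordiv m 2) 1).foldl (fun lst j =>
      lst ++ [PySem.List.pyGetD (PySem.List.pyGetD array i []) j 0]) []]) []
  let arr2 := (PySem.List.pyRange 0 (PySem.Int.floordiv n 2) 1).foldl (fun acc i =>
    acc ++ [(PySem.List.pyRange (PySem.Int.floordiv m 2) m 1).foldl (fun lst j =>
      lst ++ [PySem.List.pyGetD (PySem.List.pyGetD array i []) j 0]) []]) []
  let arr3 := (PySem.List.pyRange (PySem.Int.floordiv n 2) n 1).foldl (fun acc i =>
    acc ++ [(PySem.List.pyRange (PySem.Int.floordiv m 2) m 1).foldl (fun lst j =>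
      lst ++ [PySem.List.pyGetD (PySem.List.pyGetD array i []) j 0]) []]) []
  let arr4 := (PySem.List.pyRange (PySem.Int.floordiv n 2) n 1).foldl (fun acc i =>
    acc ++ [(PySem.List.pyRange 0 (PySem.Int.floordiv m 2) 1).foldl (fun lst j =>
      lst ++ [PySem.List.pyGetD (PySem.List.pyGetD array i []) j 0]) []]) []
  let newArr := (PySem.List.pyRange 0 (PySem.Int.floordiv n 2) 1).foldl (fun acc i =>
    acc ++ [PySem.List.pyGetD arr4 i [] ++ PySem.List.pyGetD arr1 i []]) []
  (PySem.List.pyRange 0 (PySem.Int.floordiv n 2) 1).foldl (fun acc i =>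
    acc ++ [PySem.List.pyGetD arr3 i [] ++ PySem.List.pyGetD arr2 i []]) newArr

-- ===== PORT B =====
def solution5_alt (array : List (List Int)) : List (List Int) :=
  let n : Int := PySem.List.len array
  let m : Int := PySem.List.len (PySem.List.pyGetD array 0 [])
  let h : Int := PySem.Int.floordiv n 2
  let w : Int := PySem.Int.floordiv m 2
  let out := (PySem.List.pyRange 0 h 1).map (fun i =>
    PySem.List.slice (PySem.List.pyGetD array (h + i) []) none (some w) ++
    PySem.List.slice (PySem.List.pyGetD array i []) none (some w))
  out ++ (PySem.List.pyRange 0 h 1).map (fun i =>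
    PySem.List.slice (PySem.List.pyGetD array (h + i) []) (some w) (some m) ++
    PySem.List.slice (PySem.List.pyGetD array i []) (some w) (some m))

-- ===== PRECONDITION & SPEC =====
-- Pre_ excludes exactly the inputs on which A raises IndexError: the empty list
-- (array[0]) and arrays in which some row is shorter than the first row.
def Pre_solution5 (array : List (List Int)) : Prop :=
  array ≠ [] ∧ ∀ row ∈ array, (array.headD []).length ≤ row.length
instance (array : List (List Int)) : Decidable (Pre_solution5 array) := by
  unfold Pre_solution5; infer_instance
def pvWitness_solution5 : List (List Int) := [[1, 2], [3, 4]]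

def Spec_solution5 (array : List (List Int)) (out : List (List Int)) : Prop := out = solution5_alt array
instance (array : List (List Int)) (out : List (List Int)) : Decidable (Spec_solution5 array out) := by unfold Spec_solution5; infer_instance

-- ===== CLAIM (what is proved, stated in full; the proofs are below) =====
def Claim_equal_solution5 : Prop := ∀ (array : List (List Int)), Dom_solution5 array → Pre_solution5 array → Spec_solution5 array (solution5 array)

-- ===== LEMMAS AND PROOFS =====

-- A's inner append loop over range(a, b), as a map, equals drop/take of the row.
lemma pv_map_get_slice (row : List Int) (a b : Nat) (hb : b ≤ row.length) :
    (PySem.List.pyRange (a : Int) (b : Int) 1).map (fun j => PySem.List.pyGetD row j 0)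
      = (row.drop a).take (b - a) := by
  rw [PySem.List.pyRange_one]
  have hba : ((b : Int) - (a : Int)).toNat = b - a := by omega
  rw [List.map_map, hba]
  apply List.ext_getElem
  · simp
    omega
  · intro k h1 h2
    simp only [List.getElem_map, List.getElem_range, Function.comp_apply]
    have hk : k < b - a := by simpa using h1
    have : ((a : Int) + (k : Int)) = ((a + k : Nat) : Int) := by push_cast; ring
    rw [this, PySem.List.pyGetD_natCast]
    rw [List.getD_eq_getElem _ _ (by omega)]
    simp [List.getElem_take, List.getElem_drop]

-- ===== VERDICT (by name: the statement is the Claim_ definition above) =====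
theorem solution5_spec : Claim_equal_solution5 := by
  intro array _hDom hPre
  unfold Spec_solution5

  obtain ⟨hne, hrows⟩ := hPre
  obtain ⟨r, rest, rfl⟩ : ∃ r rest, array = r :: rest := by
    cases array with
    | nil => exact absurd rfl hne
    | cons a as => exact ⟨a, as, rfl⟩
  set N := (r :: rest).length with hNdef
  set M := r.length with hMdef
  have hM : ∀ row ∈ r :: rest, M ≤ row.length := by
    intro row hrow
    have := hrows row hrow
    simpa using this
  have hfd1 : PySem.Int.floordiv ((N : Int)) 2 = ((N / 2 : Nat) : Int) := by
    exact_mod_cast PySem.Int.floordiv_natCast N 2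
  have hfd2 : PySem.Int.floordiv ((M : Int)) 2 = ((M / 2 : Nat) : Int) := by
    exact_mod_cast PySem.Int.floordiv_natCast M 2
  set H := N / 2 with hHdef
  set W := M / 2 with hWdef
  -- row facts at a Nat index
  have hrowlen : ∀ t : Nat, t < N → M ≤ (PySem.List.pyGetD (r :: rest) (t : Int) []).length := by
    intro t ht
    rw [PySem.List.pyGetD_natCast, List.getD_eq_getElem _ _ ht]
    exact hM _ (List.getElem_mem ht)
  have e1 : ∀ t : Nat, t < N →
      (PySem.List.pyRange 0 ((W : Nat) : Int) 1).map
        (fun j => PySem.List.pyGetD (PySem.List.pyGetD (r :: rest) (t : Int) []) j 0)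
      = PySem.List.slice (PySem.List.pyGetD (r :: rest) (t : Int) []) none (some ((W : Nat) : Int)) := by
    intro t ht
    rw [PySem.List.slice_to_natCast]
    have hb : W ≤ (PySem.List.pyGetD (r :: rest) (t : Int) []).length :=
      le_trans (Nat.div_le_self _ _) (hrowlen t ht)
    have := pv_map_get_slice (PySem.List.pyGetD (r :: rest) (t : Int) []) 0 W hb
    simpa using this
  have e2 : ∀ t : Nat, t < N →
      (PySem.List.pyRange ((W : Nat) : Int) ((M : Nat) : Int) 1).map
        (fun j => PySem.List.pyGetD (PySem.List.pyGetD (r :: rest) (t : Int) []) j 0)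
      = PySem.List.slice (PySem.List.pyGetD (r :: rest) (t : Int) []) (some ((W : Nat) : Int)) (some ((M : Nat) : Int)) := by
    intro t ht
    rw [PySem.List.slice_natCast]
    exact pv_map_get_slice _ W M (hrowlen t ht)
  unfold solution5 solution5_alt
  simp only [PySem.List.len_eq, PySem.List.pyGetD_zero_cons, ← hNdef, ← hMdef, hfd1, hfd2,
    PySem.List.foldl_append_singleton_eq_map, List.nil_append]
  congr 1
  · apply List.map_congr_left
    intro i hi
    obtain ⟨h0, hiH⟩ := (PySem.List.mem_pyRange_one).mp hi
    lift i to Nat using h0 with k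
    have hk : k < H := by exact_mod_cast hiH
    have hcast : ((H : Nat) : Int) + (k : Int) = ((H + k : Nat) : Int) := by push_cast; ring
    have hHk : H + k < N := by omega
    rw [PySem.List.pyGetD_map_pyRange_one _ ((H : Nat) : Int) ((N : Nat) : Int) k [] (by omega),
        PySem.List.pyGetD_map_pyRange _ H k [] hk, hcast, e1 (H + k) hHk, e1 k (by omega)]
  · apply List.map_congr_left
    intro i hi
    obtain ⟨h0, hiH⟩ := (PySem.List.mem_pyRange_one).mp hi
    lift i to Nat using h0 with k
    have hk : k < H := by exact_mod_cast hiH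
    have hcast : ((H : Nat) : Int) + (k : Int) = ((H + k : Nat) : Int) := by push_cast; ring
    have hHk : H + k < N := by omega
    rw [PySem.List.pyGetD_map_pyRange_one _ ((H : Nat) : Int) ((N : Nat) : Int) k [] (by omega),
        PySem.List.pyGetD_map_pyRange _ H k [] hk, hcast, e2 (H + k) hHk, e2 k (by omega)]
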